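-- pv_equiv track=rewrite | github.com/CobaltConcrete/DSAI_Nonogram | newcode.py | is_partial_column_consistent
-- ===== SOURCE A (Python) =====
-- def is_partial_column_consistent(partial_col, clue):
--     """
--     Check if the partial column can still be extended to satisfy the full clue.
--     Build the blocks from the partial column and ensure that they are a prefix of the clue
--     and that no block is already longer than allowed.
--     """
--     blocks = []
--     count = 0
--     for cell in partial_col:
--         if cell == '#':
--             count += 1
--         elif count > 0:
--             blocks.append(count)
--             count = 0
--     if count > 0:
--         blocks.append(count)
--     for i, block in enumerate(blocks):
--         if i >= len(clue) or block > clue[i]: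
--             return False
--     return True
-- ===== SOURCE B (Python) =====
-- def is_partial_column_consistent(partial_col, clue):
--     """Declarative re-implementation: render the column as a one-line string
--     (filled cells as '#', everything else as a space), let str.split() extract
--     the maximal '#' runs, and compare run lengths pointwise with zip/all."""
--     s = ''.join('#' if cell == '#' else ' ' for cell in partial_col)
--     blocks = [len(run) for run in s.split()]
--     return len(blocks) <= len(clue) and all(b <= c for b, c in zip(blocks, clue))
-- ===== Notes on version B (the rewrite author's own statement) =====
-- stated objective: idiomatic
-- what changed: Replaced A's hand-rolled counter loop plus indexed enumerate/early-return scan by a declarative pipeline: map the column to a '#'/' ' string, extract the runs with str.split(), and compare them to the clue with len()/zip()/all().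
import Mathlib
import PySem

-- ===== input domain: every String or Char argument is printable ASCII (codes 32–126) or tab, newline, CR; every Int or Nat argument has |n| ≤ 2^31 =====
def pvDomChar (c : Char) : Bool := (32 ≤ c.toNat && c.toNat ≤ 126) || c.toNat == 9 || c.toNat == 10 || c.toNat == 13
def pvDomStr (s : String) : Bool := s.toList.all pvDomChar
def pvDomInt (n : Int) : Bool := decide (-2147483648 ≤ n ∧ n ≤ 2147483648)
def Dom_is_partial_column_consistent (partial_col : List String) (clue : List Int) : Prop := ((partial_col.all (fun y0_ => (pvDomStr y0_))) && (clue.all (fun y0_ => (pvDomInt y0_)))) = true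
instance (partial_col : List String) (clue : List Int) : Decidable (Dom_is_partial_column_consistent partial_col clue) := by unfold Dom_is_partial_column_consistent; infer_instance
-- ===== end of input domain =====

-- B replaces A's counter loop + indexed early-return scan by a declarative pipeline:
-- render the column as a '#'/' ' string, split it into runs, compare with zip/all (idiomatic).

-- ===== PORT A =====
-- A's first loop: accumulate completed block lengths into `blocks`, with the
-- trailing `if count > 0: blocks.append(count)` applied at the end of the list.
def pvBuildBlocks : List String → List Int → Int → List Int
  | [], blocks, count => if count > 0 then blocks ++ [count] else blocks
  | cell :: rest, blocks, count =>
    if cell == "#" then pvBuildBlocks rest blocks (count + 1)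
    else if count > 0 then pvBuildBlocks rest (blocks ++ [count]) 0
    else pvBuildBlocks rest blocks count

-- A's second loop: `for i, block in enumerate(blocks)` (i < len(clue) is checked
-- before clue[i] is read, so getD is exact here).
def pvCheckBlocks : List Int → List Int → Nat → Bool
  | [], _, _ => true
  | b :: bs, clue, i =>
    if clue.length ≤ i then false
    else if b > clue.getD i 0 then false
    else pvCheckBlocks bs clue (i + 1)

def is_partial_column_consistent (partial_col : List String) (clue : List Int) : Bool :=
  pvCheckBlocks (pvBuildBlocks partial_col [] 0) clue 0

-- ===== PORT B =====
-- s = ''.join('#' if cell == '#' else ' ' for cell in partial_col); blocks = [len(r) for r in s.split()];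
-- return len(blocks) <= len(clue) and all(b <= c for b, c in zip(blocks, clue)).
def is_partial_column_consistent_alt (partial_col : List String) (clue : List Int) : Bool :=
  let s := PySem.Str.join "" (partial_col.map (fun cell => if cell == "#" then "#" else " "))
  let blocks := (PySem.Str.split₀ s).map PySem.Str.len
  decide (blocks.length ≤ clue.length) && (blocks.zip clue).all (fun p => decide (p.1 ≤ p.2))

-- ===== PRECONDITION & SPEC =====
def Spec_is_partial_column_consistent (partial_col : List String) (clue : List Int) (out : Bool) : Prop := out = is_partial_column_consistent_alt partial_col clue
instance (partial_col : List String) (clue : List Int) (out : Bool) : Decidable (Spec_is_partial_column_consistent partial_col clue out) := by unfold Spec_is_partial_column_consistent; infer_instance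

-- ===== CLAIM (what is proved, stated in full; the proofs are below) =====
def Claim_equal_is_partial_column_consistent : Prop := ∀ (partial_col : List String) (clue : List Int), Dom_is_partial_column_consistent partial_col clue → Spec_is_partial_column_consistent partial_col clue (is_partial_column_consistent partial_col clue)

-- ===== LEMMAS AND PROOFS =====

-- joining with the empty separator is flattening
theorem pvJoin_nil (l : List (List Char)) : PySem.Chars.join [] l = l.flatten := by
  induction l with
  | nil => rfl
  | cons a t ih =>
    cases t with
    | nil => simp [PySem.Chars.join, List.intercalate]
    | cons b t2 =>
      simp only [PySem.Chars.join, List.intercalate, List.intersperse] at *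
      simp [List.flatten] at *
      simpa using ih

-- one step of split₀.go on a non-space character
theorem pvGo_step_hash (cs cur : List Char) (acc : List (List Char)) :
    PySem.Chars.split₀.go ('#' :: cs) cur acc = PySem.Chars.split₀.go cs ('#' :: cur) acc := by
  simp only [PySem.Chars.split₀.go, show PySem.Chars.isspace '#' = false from rfl,
    Bool.false_eq_true, if_false]

-- one step of split₀.go on a space
theorem pvGo_step_sp (cs cur : List Char) (acc : List (List Char)) :
    PySem.Chars.split₀.go (' ' :: cs) cur acc
      = if cur.isEmpty then PySem.Chars.split₀.go cs [] acc
        else PySem.Chars.split₀.go cs [] (cur.reverse :: acc) := by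
  simp only [PySem.Chars.split₀.go, show PySem.Chars.isspace ' ' = true from rfl, if_true]

-- A's accumulator is a pure prefix: the blocks built so far only get appended to.
theorem pvBuildBlocks_acc (cells : List String) (acc : List Int) (count : Int) :
    pvBuildBlocks cells acc count = acc ++ pvBuildBlocks cells [] count := by
  induction cells generalizing acc count with
  | nil => simp [pvBuildBlocks]; split <;> simp
  | cons cell rest ih =>
    simp only [pvBuildBlocks]
    split
    · exact ih acc (count + 1)
    · split
      · simp only [List.nil_append]
        rw [ih [count] 0, ih (acc ++ [count]) 0, List.append_assoc]
      · exact ih acc count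

-- split₀.go only ever appends (reversed) words to its accumulator
theorem pvGo_acc (cs cur : List Char) (acc : List (List Char)) :
    PySem.Chars.split₀.go cs cur acc = acc.reverse ++ PySem.Chars.split₀.go cs cur [] := by
  induction cs generalizing cur acc with
  | nil =>
    simp only [PySem.Chars.split₀.go]
    split <;> simp
  | cons c rest ih =>
    simp only [PySem.Chars.split₀.go]
    split
    · split
      · exact ih [] acc
      · rw [ih [] (cur.reverse :: acc), ih [] (cur.reverse :: [])]
        simp
    · exact ih (c :: cur) acc

-- the run lengths produced by split₀.go on the rendered column are exactly
-- the blocks A builds, given that the pending word length matches A's count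
theorem pvGo_blocks (cells : List String) (cur : List Char) (count : Int)
    (h : count = (cur.length : Int)) :
    (PySem.Chars.split₀.go
        (cells.map (fun cell => if cell == "#" then '#' else ' ')) cur []).map
        (fun r => (r.length : Int))
      = pvBuildBlocks cells [] count := by
  induction cells generalizing cur count with
  | nil =>
    subst h
    rcases cur with _ | ⟨c, cur'⟩
    · simp [PySem.Chars.split₀.go, pvBuildBlocks]
    · simp [PySem.Chars.split₀.go, pvBuildBlocks]
  | cons cell rest ih =>
    simp only [List.map_cons, pvBuildBlocks]
    by_cases hc : cell == "#"
    · rw [show (if cell == "#" then '#' else ' ') = '#' from by simp [hc], pvGo_step_hash,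
        if_pos hc]
      exact ih ('#' :: cur) (count + 1) (by subst h; rw [List.length_cons]; push_cast; ring)
    · rw [show (if cell == "#" then '#' else ' ') = ' ' from by simp [hc], pvGo_step_sp,
        if_neg hc]
      rcases cur with _ | ⟨c, cur'⟩
      · have h0 : ¬ count > 0 := by subst h; simp
        rw [if_neg h0]
        simp only [List.isEmpty_nil, if_true]
        exact ih [] count h
      · have hpos : count > 0 := by rw [h]; exact_mod_cast Nat.succ_pos cur'.length
        rw [if_pos hpos]
        simp only [List.isEmpty_cons, Bool.false_eq_true, if_false]
        rw [pvGo_acc _ [] [(c :: cur').reverse], List.nil_append,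
          pvBuildBlocks_acc rest [count] 0]
        simp only [List.map_append, List.reverse_cons, List.reverse_nil, List.nil_append,
          List.map_cons, List.map_nil]
        rw [ih [] 0 (by simp)]
        simp [h]

-- A's indexed check loop is the length test plus the pointwise zip test
theorem pvCheck_eq (bs clue : List Int) (i : Nat) (hi : i ≤ clue.length) :
    pvCheckBlocks bs clue i
      = (decide (bs.length + i ≤ clue.length)
          && (bs.zip (clue.drop i)).all (fun p => decide (p.1 ≤ p.2))) := by
  induction bs generalizing i with
  | nil => simp [pvCheckBlocks, hi]
  | cons b t ih =>
    simp only [pvCheckBlocks]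
    by_cases hlen : clue.length ≤ i
    · have hne : ¬ (t.length + 1 + i ≤ clue.length) := by omega
      simp [hlen, hne]
    · have hi2 : i < clue.length := by omega
      rw [if_neg hlen, List.drop_eq_getElem_cons hi2]
      simp only [List.zip_cons_cons, List.all_cons, List.length_cons]
      have hgetD : clue.getD i 0 = clue[i] := by
        rw [List.getD_eq_getElem?_getD, List.getElem?_eq_getElem hi2]; rfl
      by_cases hb : b > clue.getD i 0
      · rw [if_pos hb]
        have hnb : ¬ (b ≤ clue[i]) := by rw [← hgetD]; omega
        simp [hnb]
      · rw [if_neg hb]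
        have hble : b ≤ clue[i] := by rw [← hgetD]; omega
        rw [ih (i + 1) (by omega)]
        simp only [hble, decide_true, Bool.true_and]
        congr 1
        simp only [decide_eq_decide]
        omega

-- rendering the column: the joined string's characters cell by cell
theorem pvRender (l : List String) :
    ((l.map (fun cell => if cell == "#" then "#" else " ")).map String.toList).flatten
      = l.map (fun cell => if cell == "#" then '#' else ' ') := by
  induction l with
  | nil => rfl
  | cons cell rest ih =>
    simp only [List.map_cons, List.flatten_cons, ih]
    by_cases hc : cell == "#" <;> simp [hc]

-- B's blocks are A's blocks
theorem pvBlocks_eq (partial_col : List String) :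
    (PySem.Str.split₀ (PySem.Str.join "" (partial_col.map (fun cell => if cell == "#" then "#" else " ")))).map PySem.Str.len
      = pvBuildBlocks partial_col [] 0 := by
  have hlen : ∀ l : List String, l.map PySem.Str.len = (l.map String.toList).map (fun r => (r.length : Int)) := by
    intro l
    rw [List.map_map]
    rfl
  rw [hlen, PySem.Str.split₀_map_toList]
  rw [show (PySem.Str.join "" (partial_col.map (fun cell => if cell == "#" then "#" else " "))).toList
      = partial_col.map (fun cell => if cell == "#" then '#' else ' ') from by
    simp only [PySem.Str.join, String.toList_ofList]
    rw [show ("" : String).toList = [] from rfl, pvJoin_nil]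
    exact pvRender partial_col]
  exact pvGo_blocks partial_col [] 0 rfl

-- ===== VERDICT (by name: the statement is the Claim_ definition above) =====
theorem is_partial_column_consistent_spec : Claim_equal_is_partial_column_consistent := by
  intro partial_col clue _
  unfold Spec_is_partial_column_consistent is_partial_column_consistent is_partial_column_consistent_alt
  simp only [pvBlocks_eq]
  rw [pvCheck_eq _ _ 0 (Nat.zero_le _)]
  simp
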